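-- pv_equiv track=rewrite | github.com/ARTbio/tools-artbio | tools/small_rna_maps/small_rna_maps.py | grouper
-- ===== SOURCE A (Python) =====
-- def grouper(iterable, clust_distance):
--     prev = None
--     group = []
--     for item in iterable:
--         if not prev or item - prev <= clust_distance:
--             group.append(item)
--         else:
--             yield group
--             group = [item]
--         prev = item
--     if group:
--         yield group
-- ===== SOURCE B (Python) =====
-- def grouper(iterable, clust_distance):
--     items = list(iterable)
--
--     def group_end(i):
--         # first index after the run of items within clustering distance
--         while i < len(items) and items[i] - items[i - 1] <= clust_distance:
--             i += 1
--         return i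
--
--     start = 0
--     while start < len(items):
--         end = group_end(start + 1)
--         yield items[start:end]
--         start = end
-- ===== Notes on version B (the rewrite author's own statement) =====
-- stated objective: alternative
-- what changed: Replaces the fold that carries a pending group and prev across the whole iteration with a split-off-the-first-group decomposition over indices: a helper scans forward to the first break index, the outer loop yields that slice and restarts the scan there.
-- intended difference: When an item equal to 0 is immediately followed by an item farther than clust_distance, A's falsy `not prev` test suppresses the break and A merges the two into one group, while B starts a new group there as the clustering distance demands. — e.g. on grouper([0, 5], 1): A returns [[0, 5]], B returns [[0], [5]]
import Mathlib
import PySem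

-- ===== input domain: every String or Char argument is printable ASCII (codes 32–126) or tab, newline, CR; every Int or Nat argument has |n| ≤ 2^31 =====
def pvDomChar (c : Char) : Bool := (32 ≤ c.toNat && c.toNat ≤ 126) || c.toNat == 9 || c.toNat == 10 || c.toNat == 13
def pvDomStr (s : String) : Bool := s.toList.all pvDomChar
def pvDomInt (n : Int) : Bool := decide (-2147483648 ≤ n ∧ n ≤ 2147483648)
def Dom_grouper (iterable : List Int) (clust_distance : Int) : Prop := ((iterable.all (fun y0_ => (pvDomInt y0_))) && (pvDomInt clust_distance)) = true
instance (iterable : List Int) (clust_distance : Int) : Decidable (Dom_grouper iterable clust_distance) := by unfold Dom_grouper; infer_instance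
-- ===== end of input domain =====

-- B replaces A's fold carrying a pending group across the loop with a
-- find-the-next-break-index-then-slice decomposition (objective: alternative);
-- B breaks purely on clustering distance, see D_grouper for the stated difference.

-- ===== PORT A =====
-- A's loop state: (prev : Option Int, group, groups yielded so far).
-- Python's `not prev` is true when prev is None or prev == 0.
def grouperStep (clust_distance : Int)
    (st : Option Int × List Int × List (List Int)) (item : Int) :
    Option Int × List Int × List (List Int) :=
  match st with
  | (prev, group, out) =>
    if prev = none ∨ prev = some 0 ∨ (∀ p ∈ prev, item - p ≤ clust_distance) then
      (some item, group ++ [item], out)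
    else
      (some item, [item], out ++ [group])

def grouper (iterable : List Int) (clust_distance : Int) : List (List Int) :=
  let s := iterable.foldl (grouperStep clust_distance) (none, [], [])
  if s.2.1 ≠ [] then s.2.2 ++ [s.2.1] else s.2.2

-- ===== PORT B =====
-- group_end: the while loop advancing i while items[i] chains onto items[i-1]
-- (items[i-1] / items[i] are in range whenever the loop reads them: 1 <= i < len);
-- the fuel argument only totalizes the loop (items.length steps always suffice).
def groupEnd (items : List Int) (clust_distance : Int) : Nat → Nat → Nat
  | 0, i => i
  | fuel + 1, i =>
    if i < items.length ∧
        PySem.List.pyGetD items (i : Int) 0 - PySem.List.pyGetD items ((i : Int) - 1) 0 ≤ clust_distance then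
      groupEnd items clust_distance fuel (i + 1)
    else i

-- the outer while loop: yield items[start:end], continue from end
-- (fuel totalizes it; start advances by at least one per iteration)
def altLoop (items : List Int) (clust_distance : Int) : Nat → Nat → List (List Int)
  | 0, _ => []
  | fuel + 1, start =>
    if start < items.length then
      PySem.List.slice items (some (start : Int))
          (some ((groupEnd items clust_distance items.length (start + 1) : Nat) : Int))
        :: altLoop items clust_distance fuel (groupEnd items clust_distance items.length (start + 1))
    else []

def grouper_alt (iterable : List Int) (clust_distance : Int) : List (List Int) :=
  altLoop iterable clust_distance (iterable.length + 1) 0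

-- ===== PRECONDITION & SPEC =====
-- On inputs where an item 0 is immediately followed by an item more than
-- clust_distance away, A's falsy `not prev` test suppresses the break and A merges
-- the two into one group, while B starts a new group there as the clustering
-- distance demands; B's value is the intended grouping.
def D_grouper (iterable : List Int) (clust_distance : Int) : Prop :=
  ∃ p ∈ iterable.zip iterable.tail, p.1 = 0 ∧ clust_distance < p.2
instance (iterable : List Int) (clust_distance : Int) : Decidable (D_grouper iterable clust_distance) := by unfold D_grouper; infer_instance

def Spec_grouper (iterable : List Int) (clust_distance : Int) (out : List (List Int)) : Prop := ¬ D_grouper iterable clust_distance → out = grouper_alt iterable clust_distance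
instance (iterable : List Int) (clust_distance : Int) (out : List (List Int)) : Decidable (Spec_grouper iterable clust_distance out) := by unfold Spec_grouper; infer_instance

def pvDiffWitness_grouper : List Int × Int := ([0, 5], 1)
def pvDiffWitnessOut_grouper : (List (List Int)) × (List (List Int)) := ([[0, 5]], [[0], [5]])

-- ===== CLAIM (what is proved, stated in full; the proofs are below) =====
def Claim_unchanged_grouper : Prop := ∀ (iterable : List Int) (clust_distance : Int), Dom_grouper iterable clust_distance → Spec_grouper iterable clust_distance (grouper iterable clust_distance)
def Claim_changed_grouper : Prop := Dom_grouper (pvDiffWitness_grouper.1) (pvDiffWitness_grouper.2) ∧ D_grouper (pvDiffWitness_grouper.1) (pvDiffWitness_grouper.2) ∧ grouper (pvDiffWitness_grouper.1) (pvDiffWitness_grouper.2) = pvDiffWitnessOut_grouper.1 ∧ grouper_alt (pvDiffWitness_grouper.1) (pvDiffWitness_grouper.2) = pvDiffWitnessOut_grouper.2 ∧ pvDiffWitnessOut_grouper.1 ≠ pvDiffWitnessOut_grouper.2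
def Claim_exact_grouper : Prop := ∀ (iterable : List Int) (clust_distance : Int), Dom_grouper iterable clust_distance → D_grouper iterable clust_distance → grouper iterable clust_distance ≠ grouper_alt iterable clust_distance

-- ===== LEMMAS AND PROOFS =====

-- proof-only middle-men: the first group (after a fixed head) as (chain prefix, remainder),
-- one with A's falsy-zero rule, one with B's pure-distance rule
def takeGroupA (d : Int) (prev : Int) : List Int → List Int × List Int
  | [] => ([], [])
  | x :: xs =>
    if prev = 0 ∨ x - prev ≤ d then
      let (g, r) := takeGroupA d x xs
      (x :: g, r)
    else
      ([], x :: xs)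

def takeGroupB (d : Int) (prev : Int) : List Int → List Int × List Int
  | [] => ([], [])
  | x :: xs =>
    if x - prev ≤ d then
      let (g, r) := takeGroupB d x xs
      (x :: g, r)
    else
      ([], x :: xs)

theorem takeGroupA_snd_len (d prev : Int) (l : List Int) :
    (takeGroupA d prev l).2.length ≤ l.length := by
  induction l generalizing prev with
  | nil => simp [takeGroupA]
  | cons x xs ih =>
    simp only [takeGroupA]
    split
    · simpa using Nat.le_succ_of_le (ih x)
    · simp

theorem takeGroupB_snd_len (d prev : Int) (l : List Int) :
    (takeGroupB d prev l).2.length ≤ l.length := by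
  induction l generalizing prev with
  | nil => simp [takeGroupB]
  | cons x xs ih =>
    simp only [takeGroupB]
    split
    · simpa using Nat.le_succ_of_le (ih x)
    · simp

theorem takeGroupB_append (d prev : Int) (l : List Int) :
    (takeGroupB d prev l).1 ++ (takeGroupB d prev l).2 = l := by
  induction l generalizing prev with
  | nil => simp [takeGroupB]
  | cons x xs ih =>
    simp only [takeGroupB]
    split
    · simpa using ih x
    · simp

-- proof-only recursive specifications each port is reduced to
def specA (iterable : List Int) (d : Int) : List (List Int) :=
  match iterable with
  | [] => []
  | head :: rest =>
    let p := takeGroupA d head rest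
    (head :: p.1) :: specA p.2 d
termination_by iterable.length
decreasing_by simpa using Nat.lt_succ_of_le (takeGroupA_snd_len d head rest)

def specB (iterable : List Int) (d : Int) : List (List Int) :=
  match iterable with
  | [] => []
  | head :: rest =>
    let p := takeGroupB d head rest
    (head :: p.1) :: specB p.2 d
termination_by iterable.length
decreasing_by simpa using Nat.lt_succ_of_le (takeGroupB_snd_len d head rest)

def grouperFinish (s : Option Int × List Int × List (List Int)) : List (List Int) :=
  if s.2.1 ≠ [] then s.2.2 ++ [s.2.1] else s.2.2

theorem grouper_main (d : Int) (l : List Int) :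
    ∀ (p : Int) (g : List Int) (acc : List (List Int)), g ≠ [] →
    grouperFinish (l.foldl (grouperStep d) (some p, g, acc)) =
      acc ++ (g ++ (takeGroupA d p l).1) :: specA (takeGroupA d p l).2 d := by
  induction l with
  | nil =>
    intro p g acc hg
    simp [takeGroupA, grouperFinish, hg, specA]
  | cons x xs ih =>
    intro p g acc hg
    by_cases h : p = 0 ∨ x - p ≤ d
    · have hstep : grouperStep d (some p, g, acc) x = (some x, g ++ [x], acc) := by
        simp only [grouperStep]
        rw [if_pos]
        rcases h with h | h
        · exact Or.inr (Or.inl (by simp [h]))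
        · exact Or.inr (Or.inr (by simpa using h))
      have htg : takeGroupA d p (x :: xs) =
          ((x :: (takeGroupA d x xs).1), (takeGroupA d x xs).2) := by
        simp only [takeGroupA, if_pos h]
      rw [List.foldl_cons, hstep, ih x (g ++ [x]) acc (by simp), htg]
      simp
    · have hstep : grouperStep d (some p, g, acc) x = (some x, [x], acc ++ [g]) := by
        simp only [grouperStep]
        rw [if_neg]
        rintro (hc | hc | hc)
        · simp at hc
        · exact h (Or.inl (by simpa using hc))
        · exact h (Or.inr (hc p rfl))
      have htg : takeGroupA d p (x :: xs) = ([], x :: xs) := by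
        simp only [takeGroupA, if_neg h]
      rw [List.foldl_cons, hstep, ih x [x] (acc ++ [g]) (by simp), htg]
      conv_rhs => rw [specA]
      simp

theorem getD_append_cons (pre : List Int) (y : Int) (ys : List Int) :
    (pre ++ y :: ys).getD pre.length 0 = y := by
  simp [List.getD]

theorem groupEnd_eq_takeGroupB (d : Int) (l : List Int) :
    ∀ (pre : List Int) (p : Int) (fuel : Nat), l.length ≤ fuel →
    groupEnd (pre ++ p :: l) d fuel (pre.length + 1) =
      pre.length + 1 + (takeGroupB d p l).1.length := by
  induction l with
  | nil =>
    intro pre p fuel _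
    cases fuel with
    | zero => simp [groupEnd, takeGroupB]
    | succ f =>
      rw [groupEnd]
      rw [if_neg]
      · simp [takeGroupB]
      · rintro ⟨hc, -⟩
        simp at hc
  | cons y l' ih =>
    intro pre p fuel hfuel
    obtain ⟨f, rfl⟩ : ∃ f, fuel = f + 1 := ⟨fuel - 1, by simp at hfuel; omega⟩
    have hlen : pre.length + 1 < (pre ++ p :: y :: l').length := by simp
    have hprev : PySem.List.pyGetD (pre ++ p :: y :: l') ((pre.length + 1 : Nat) - 1 : Int) 0 = p := by
      have : ((pre.length + 1 : Nat) : Int) - 1 = ((pre.length : Nat) : Int) := by omega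
      rw [this, PySem.List.pyGetD_natCast, getD_append_cons]
    have hcur : PySem.List.pyGetD (pre ++ p :: y :: l') ((pre.length + 1 : Nat) : Int) 0 = y := by
      rw [PySem.List.pyGetD_natCast]
      have h2 : pre ++ p :: y :: l' = (pre ++ [p]) ++ y :: l' := by simp
      have h3 : pre.length + 1 = (pre ++ [p]).length := by simp
      rw [h2, h3, getD_append_cons]
    by_cases h : y - p ≤ d
    · rw [groupEnd]
      rw [if_pos ⟨hlen, by rw [hprev, hcur]; exact h⟩]
      have h2 : pre ++ p :: y :: l' = (pre ++ [p]) ++ y :: l' := by simp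
      have h3 : pre.length + 1 + 1 = (pre ++ [p]).length + 1 := by simp
      rw [h2, h3, ih (pre ++ [p]) y f (by simp at hfuel ⊢; omega)]
      simp only [takeGroupB, if_pos h]
      simp
      omega
    · rw [groupEnd]
      rw [if_neg]
      · simp only [takeGroupB, if_neg h]
        simp
      · rw [hprev, hcur]
        exact fun hc => h hc.2

theorem altLoop_eq (d : Int) : ∀ (n : Nat) (l pre : List Int) (fuel : Nat), l.length ≤ n →
    l.length + 1 ≤ fuel → altLoop (pre ++ l) d fuel pre.length = specB l d := by
  intro n
  induction n with
  | zero =>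
    intro l pre fuel hn hfuel
    have : l = [] := List.eq_nil_of_length_eq_zero (by omega)
    subst this
    obtain ⟨f, rfl⟩ : ∃ f, fuel = f + 1 := ⟨fuel - 1, by omega⟩
    rw [altLoop]
    simp [specB]
  | succ n ih =>
    intro l pre fuel hn hfuel
    obtain ⟨f, rfl⟩ : ∃ f, fuel = f + 1 := ⟨fuel - 1, by omega⟩
    match l with
    | [] =>
      rw [altLoop]
      simp [specB]
    | p :: rest =>
      have hlen : pre.length < (pre ++ p :: rest).length := by simp
      have hge : rest.length ≤ (pre ++ p :: rest).length := by simp; omega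
      rw [altLoop, if_pos hlen, groupEnd_eq_takeGroupB d rest pre p _ hge]
      set k := (takeGroupB d p rest).1.length with hk
      have htg := takeGroupB_append d p rest
      have hslice : PySem.List.slice (pre ++ p :: rest) (some ((pre.length : Nat) : Int))
          (some ((pre.length + 1 + k : Nat) : Int)) = p :: (takeGroupB d p rest).1 := by
        rw [PySem.List.slice_natCast]
        have hdrop : (pre ++ p :: rest).drop pre.length = p :: rest := by
          simp
        rw [hdrop]
        have : pre.length + 1 + k - pre.length = k + 1 := by omega
        rw [this]
        simp only [List.take_succ_cons]
        congr 1
        conv_lhs => rw [← htg]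
        exact List.take_left' hk.symm
      rw [hslice]
      have hsplit : pre ++ p :: rest = (pre ++ p :: (takeGroupB d p rest).1) ++ (takeGroupB d p rest).2 := by
        conv_lhs => rw [← htg]
        simp
      have hlen2 : pre.length + 1 + k = (pre ++ p :: (takeGroupB d p rest).1).length := by
        simp [hk]; omega
      have hr := takeGroupB_snd_len d p rest
      rw [hsplit, hlen2, ih (takeGroupB d p rest).2 (pre ++ p :: (takeGroupB d p rest).1) f
        (by simp at hn; omega) (by simp at hfuel; omega)]
      conv_rhs => rw [specB]

theorem grouper_eq_specA (l : List Int) (d : Int) : grouper l d = specA l d := by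
  cases l with
  | nil => simp [grouper, specA]
  | cons x xs =>
    have h0 : grouperStep d (none, [], []) x = (some x, [x], []) := by
      simp [grouperStep]
    have := grouper_main d xs x [x] [] (by simp)
    show grouperFinish ((x :: xs).foldl (grouperStep d) (none, [], [])) = _
    rw [List.foldl_cons, h0, this, specA]
    simp

theorem grouper_alt_eq_specB (l : List Int) (d : Int) : grouper_alt l d = specB l d := by
  have := altLoop_eq d l.length l [] (l.length + 1) (le_refl _) (le_refl _)
  simpa [grouper_alt] using this

-- D_ on a two-or-more-element list unfolds to head pair or tail
theorem D_cons (x y : Int) (t : List Int) (d : Int) :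
    D_grouper (x :: y :: t) d ↔ (x = 0 ∧ d < y) ∨ D_grouper (y :: t) d := by
  simp only [D_grouper, List.tail_cons, List.zip_cons_cons]
  constructor
  · rintro ⟨p, hp, h⟩
    rcases List.mem_cons.mp hp with h1 | h1
    · subst h1; exact Or.inl h
    · exact Or.inr ⟨p, h1, h⟩
  · rintro (h | ⟨p, hp, h⟩)
    · exact ⟨(x, y), List.mem_cons_self, h⟩
    · exact ⟨p, List.mem_cons_of_mem _ hp, h⟩

theorem D_tail (x : Int) (t : List Int) (d : Int) :
    D_grouper t d → D_grouper (x :: t) d := by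
  cases t with
  | nil => simp [D_grouper]
  | cons y t' => intro h; exact (D_cons x y t' d).mpr (Or.inr h)

theorem D_suffix {r l : List Int} (d : Int) (h : r <:+ l) :
    D_grouper r d → D_grouper l d := by
  obtain ⟨pre, rfl⟩ := h
  induction pre with
  | nil => exact id
  | cons a pre ih => intro hr; exact D_tail a _ d (ih hr)

theorem takeGroupB_snd_suffix (d prev : Int) (l : List Int) :
    (takeGroupB d prev l).2 <:+ l := by
  induction l generalizing prev with
  | nil => simp [takeGroupB]
  | cons x xs ih =>
    simp only [takeGroupB]
    split
    · exact (ih x).trans (List.suffix_cons x xs)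
    · simp

-- outside D_, both takeGroups agree
theorem takeGroup_eq (d : Int) (l : List Int) : ∀ (p : Int),
    ¬ D_grouper (p :: l) d → takeGroupA d p l = takeGroupB d p l := by
  induction l with
  | nil => intro p _; simp [takeGroupA, takeGroupB]
  | cons x xs ih =>
    intro p hD
    have hpair : ¬ (p = 0 ∧ d < x) := fun h => hD ((D_cons p x xs d).mpr (Or.inl h))
    have htail : ¬ D_grouper (x :: xs) d := fun h => hD ((D_cons p x xs d).mpr (Or.inr h))
    have hcond : (p = 0 ∨ x - p ≤ d) ↔ (x - p ≤ d) := by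
      constructor
      · rintro (h | h)
        · subst h; simp; by_contra hc; exact hpair ⟨rfl, by omega⟩
        · exact h
      · exact Or.inr
    simp only [takeGroupA, takeGroupB]
    by_cases h : x - p ≤ d
    · rw [if_pos (hcond.mpr h), if_pos h, ih x htail]
    · rw [if_neg (fun hc => h (hcond.mp hc)), if_neg h]

theorem spec_eq (d : Int) : ∀ (n : Nat) (l : List Int), l.length ≤ n →
    ¬ D_grouper l d → specA l d = specB l d := by
  intro n
  induction n with
  | zero =>
    intro l hn _
    have : l = [] := List.eq_nil_of_length_eq_zero (by omega)
    subst this; rw [specA, specB]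
  | succ n ih =>
    intro l hn hD
    match l with
    | [] => rw [specA, specB]
    | p :: rest =>
      rw [specA, specB, takeGroup_eq d rest p hD]
      have hsuf : (takeGroupB d p rest).2 <:+ p :: rest :=
        (takeGroupB_snd_suffix d p rest).trans (List.suffix_cons p rest)
      have hlen : (takeGroupB d p rest).2.length ≤ n := by
        have := takeGroupB_snd_len d p rest
        simp at hn; omega
      rw [ih _ hlen (fun h => hD (D_suffix d hsuf h))]

-- inside D_: either the first groups already differ, or they agree and D_ persists in the remainder
theorem takeGroup_diff (d : Int) (l : List Int) : ∀ (p : Int), D_grouper (p :: l) d →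
    (takeGroupA d p l).1 ≠ (takeGroupB d p l).1 ∨
      (takeGroupA d p l = takeGroupB d p l ∧ D_grouper ((takeGroupA d p l).2) d) := by
  induction l with
  | nil => intro p hD; exact absurd hD (by simp [D_grouper])
  | cons x xs ih =>
    intro p hD
    rcases (D_cons p x xs d).mp hD with hpair | htail
    · -- bad pair at the head: A keeps, B breaks
      have hA : p = 0 ∨ x - p ≤ d := Or.inl hpair.1
      have hB : ¬ (x - p ≤ d) := by have := hpair; omega
      left
      simp only [takeGroupA, takeGroupB, if_pos hA, if_neg hB]
      simp
    · by_cases hBc : x - p ≤ d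
      · have hA : p = 0 ∨ x - p ≤ d := Or.inr hBc
        simp only [takeGroupA, takeGroupB, if_pos hA, if_pos hBc]
        rcases ih x htail with h | ⟨heq, hrem⟩
        · left; simpa using h
        · right
          constructor
          · simp [heq]
          · simpa using hrem
      · by_cases hAc : p = 0 ∨ x - p ≤ d
        · -- A keeps (p = 0), B breaks: groups differ
          left
          simp only [takeGroupA, takeGroupB, if_pos hAc, if_neg hBc]
          simp
        · -- both break; bad pair is in the remainder
          right
          refine ⟨?_, ?_⟩ <;> simp only [takeGroupA, takeGroupB, if_neg hAc, if_neg hBc]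
          exact htail

theorem spec_ne (d : Int) : ∀ (n : Nat) (l : List Int), l.length ≤ n →
    D_grouper l d → specA l d ≠ specB l d := by
  intro n
  induction n with
  | zero =>
    intro l hn hD
    have : l = [] := List.eq_nil_of_length_eq_zero (by omega)
    subst this; exact absurd hD (by simp [D_grouper])
  | succ n ih =>
    intro l hn hD
    match l with
    | [] => exact absurd hD (by simp [D_grouper])
    | p :: rest =>
      rw [specA, specB]
      rcases takeGroup_diff d rest p hD with h | ⟨heq, hrem⟩
      · intro hc
        exact h (by injection (List.cons.inj hc).1)
      · have hlenr : (takeGroupA d p rest).2.length ≤ n := by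
          have := takeGroupA_snd_len d p rest
          simp at hn; omega
        have hne := ih _ hlenr hrem
        intro hc
        have := (List.cons.inj hc).2
        rw [heq] at hne
        rw [heq] at this
        exact hne this

-- ===== VERDICT (by name: the statements are the Claim_ definitions above) =====
theorem grouper_spec : Claim_unchanged_grouper := by
  intro iterable clust_distance _
  unfold Spec_grouper
  intro hD
  rw [grouper_eq_specA, grouper_alt_eq_specB]
  exact spec_eq clust_distance iterable.length iterable (le_refl _) hD

theorem grouper_changed : Claim_changed_grouper := by
  unfold Claim_changed_grouper
  refine ⟨by decide, by decide, by decide, ?_, by decide⟩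
  rw [show pvDiffWitness_grouper = ([0, 5], 1) from rfl]
  rw [grouper_alt_eq_specB]
  rw [specB.eq_def]
  simp only [takeGroupB]
  norm_num
  rw [specB.eq_def]
  simp only [takeGroupB]
  rw [specB.eq_def]
  rfl

theorem grouper_tight : Claim_exact_grouper := by
  intro iterable clust_distance _ hD
  rw [grouper_eq_specA, grouper_alt_eq_specB]
  exact spec_ne clust_distance iterable.length iterable (le_refl _) hD
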